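-- pv_equiv track=rewrite | github.com/zabler/medipy | Module/rdetections/dectclass.py | detectrzacken
-- ===== SOURCE A (Python) =====
-- def detectrzacken(register, threshold_up, threshold_down, currentindex):
--     treshval = []
--     maxofaround = []
--     counter = currentindex
--     peaks = []
--
--     # For Schleife in Register
--     for val in register:
--         if val > threshold_up:
--             treshval.append([counter, 1, val])
--         else:
--             treshval.append([counter, 0, val])
--         counter += 1
--
--     # For Schleife mit markierten Werte die höher als TreshUp liegen
--     for i in treshval:
--         if i[1] == 1:
--             maxofaround.append(i)
--
--             # Falls Ende erreicht
--             if i[0] == treshval[-1][0]: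
--                 if maxofaround:  # Und wenn überhaupt Werte größere Schwellwert vorhanden sind
--                     currentmax = maxofaround[0]
--                     for t in maxofaround:
--                         if t[2] > currentmax[2]:
--                             currentmax = t
--                     peaks.append(currentmax[0])
--                     # allpeaks.append(currentmax[0])
--                     # Liste Leeren
--                     maxofaround = []
--
--         else:  # Wenn keine Werte mehr über Schwellwert
--             if maxofaround:  # Und wenn überhaupt Werte größer Schwellwert vorhanden sind
--                 currentmax = maxofaround[0]
--                 for t in maxofaround:
--                     if t[2] > currentmax[2]:
--                         currentmax = t
--                 peaks.append(currentmax[0])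
--                 # allpeaks.append(currentmax[0])
--                 # Liste Leeren
--                 maxofaround = []
--     return peaks  # globaleSamplewerte
-- ===== SOURCE B (Python) =====
-- def detectrzacken(register, threshold_up, threshold_down, currentindex):
--     # single pass: keep (index, value) of the current run's first maximum
--     peaks = []
--     idx = currentindex
--     best = None
--     for val in register:
--         if val > threshold_up:
--             if best is None or val > best[1]:
--                 best = (idx, val)
--         else:
--             if best is not None:
--                 peaks.append(best[0])
--                 best = None
--         idx += 1
--     if best is not None:
--         peaks.append(best[0])
--     return peaks
-- ===== Notes on version B (the rewrite author's own statement) =====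
-- stated objective: faster
-- what changed: Replaces A's three passes (materialise a flagged triple list, rescan it, and re-scan each completed run to find its max) by one pass that keeps a running first-maximum (index,value) of the current above-threshold run and flushes it when the run ends or the input does.
import Mathlib
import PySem

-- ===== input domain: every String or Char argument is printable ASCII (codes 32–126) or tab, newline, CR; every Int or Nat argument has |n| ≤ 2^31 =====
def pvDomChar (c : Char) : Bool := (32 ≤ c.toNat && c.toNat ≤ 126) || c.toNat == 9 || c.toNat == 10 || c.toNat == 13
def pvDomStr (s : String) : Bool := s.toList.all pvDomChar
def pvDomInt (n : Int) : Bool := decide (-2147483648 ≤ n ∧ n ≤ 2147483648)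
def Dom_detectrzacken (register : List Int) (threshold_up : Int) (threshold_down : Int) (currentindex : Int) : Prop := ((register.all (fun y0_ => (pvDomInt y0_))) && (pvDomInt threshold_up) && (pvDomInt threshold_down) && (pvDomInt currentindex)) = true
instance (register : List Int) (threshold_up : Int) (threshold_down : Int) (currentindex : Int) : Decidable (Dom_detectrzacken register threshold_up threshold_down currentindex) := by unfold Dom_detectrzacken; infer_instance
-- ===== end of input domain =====

-- B replaces A's three passes (flagged triple list, rescan, per-run max rescans) by one
-- running-max pass; objective: simpler (same asymptotic cost).


-- ===== PORT A =====
-- inner rescan "currentmax = maxofaround[0]; for t in maxofaround: if t[2] > currentmax[2]: currentmax = t"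
def pvAMaxScan (mo : List (Int × Int × Int)) (m : Int × Int × Int) : Int × Int × Int :=
  mo.foldl (fun cm t => if t.2.2 > cm.2.2 then t else cm) m

def detectrzacken (register : List Int) (threshold_up : Int) (threshold_down : Int) (currentindex : Int) : List Int :=
  -- first loop: build treshval (list of [counter, flag, val] triples), counter starts at currentindex
  let tvc := register.foldl
    (fun (st : List (Int × Int × Int) × Int) val =>
      (if val > threshold_up then st.1 ++ [(st.2, 1, val)] else st.1 ++ [(st.2, 0, val)], st.2 + 1))
    ([], currentindex)
  let treshval := tvc.1
  -- second loop over treshval: state = (maxofaround, peaks)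
  let res := treshval.foldl
    (fun (st : List (Int × Int × Int) × List Int) i =>
      if i.2.1 == 1 then
        let mo := st.1 ++ [i]
        if some i.1 == treshval.getLast?.map (·.1) then  -- i[0] == treshval[-1][0]
          match mo with
          | [] => (mo, st.2)                              -- "if maxofaround:" guard
          | m :: _ => ([], st.2 ++ [(pvAMaxScan mo m).1])
        else (mo, st.2)
      else
        match st.1 with
        | [] => (st.1, st.2)
        | m :: _ => ([], st.2 ++ [(pvAMaxScan st.1 m).1]))
    ([], [])
  res.2

-- ===== PORT B =====
-- single pass; state = (peaks, idx, best) where best is the current run's first maximum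
def pvBStep (threshold_up : Int) (st : List Int × Int × Option (Int × Int)) (val : Int) :
    List Int × Int × Option (Int × Int) :=
  if val > threshold_up then
    match st.2.2 with
    | none => (st.1, st.2.1 + 1, some (st.2.1, val))
    | some b => (st.1, st.2.1 + 1, if val > b.2 then some (st.2.1, val) else some b)
  else
    match st.2.2 with
    | none => (st.1, st.2.1 + 1, none)
    | some b => (st.1 ++ [b.1], st.2.1 + 1, none)

def detectrzacken_alt (register : List Int) (threshold_up : Int) (threshold_down : Int) (currentindex : Int) : List Int :=
  let st := register.foldl (pvBStep threshold_up) ([], currentindex, none)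
  match st.2.2 with
  | none => st.1
  | some b => st.1 ++ [b.1]

-- ===== PRECONDITION & SPEC =====
def Spec_detectrzacken (register : List Int) (threshold_up : Int) (threshold_down : Int) (currentindex : Int) (out : List Int) : Prop := out = detectrzacken_alt register threshold_up threshold_down currentindex
instance (register : List Int) (threshold_up : Int) (threshold_down : Int) (currentindex : Int) (out : List Int) : Decidable (Spec_detectrzacken register threshold_up threshold_down currentindex out) := by unfold Spec_detectrzacken; infer_instance

-- ===== CLAIM (what is proved, stated in full; the proofs are below) =====
def Claim_equal_detectrzacken : Prop := ∀ (register : List Int) (threshold_up : Int) (threshold_down : Int) (currentindex : Int), Dom_detectrzacken register threshold_up threshold_down currentindex → Spec_detectrzacken register threshold_up threshold_down currentindex (detectrzacken register threshold_up threshold_down currentindex)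

-- ===== LEMMAS AND PROOFS =====

-- the triple list A's first loop builds, as a recursive function
def pvMkTv (up c : Int) : List Int → List (Int × Int × Int)
  | [] => []
  | v :: vs => (c, if v > up then 1 else 0, v) :: pvMkTv up (c + 1) vs

lemma pvBuild_eq (up : Int) (xs : List Int) : ∀ (acc : List (Int × Int × Int)) (c : Int),
    xs.foldl (fun (st : List (Int × Int × Int) × Int) val =>
      (if val > up then st.1 ++ [(st.2, 1, val)] else st.1 ++ [(st.2, 0, val)], st.2 + 1))
      (acc, c) = (acc ++ pvMkTv up c xs, c + xs.length) := by
  induction xs with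
  | nil => intro acc c; simp [pvMkTv]
  | cons v vs ih =>
    intro acc c
    simp only [List.foldl_cons, pvMkTv]
    by_cases h : v > up <;> simp [h, ih, List.append_assoc] <;> ring_nf

lemma pvMkTv_last (up : Int) (xs : List Int) : ∀ (c : Int), xs ≠ [] →
    (pvMkTv up c xs).getLast?.map (·.1) = some (c + xs.length - 1) := by
  induction xs with
  | nil => intro c h; exact absurd rfl h
  | cons v vs ih =>
    intro c _
    cases vs with
    | nil => simp [pvMkTv]
    | cons w ws =>
      have h2 : (pvMkTv up c (v :: w :: ws)).getLast? = (pvMkTv up (c+1) (w :: ws)).getLast? := by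
        simp only [pvMkTv, List.getLast?_cons_cons]
      rw [h2, ih (c+1) (by simp)]
      simp; push_cast; ring

-- the per-run maximum A recomputes by rescanning, as an (index, value) option
def pvAMax : List (Int × Int × Int) → Option (Int × Int)
  | [] => none
  | m :: ms => some ((pvAMaxScan (m :: ms) m).1, (pvAMaxScan (m :: ms) m).2.2)

lemma pvAMaxScan_cons (mo : List (Int × Int × Int)) (m t : Int × Int × Int) :
    pvAMaxScan (t :: mo) m = pvAMaxScan mo (if t.2.2 > m.2.2 then t else m) := by
  simp [pvAMaxScan, List.foldl_cons]

lemma pvAMaxScan_append (mo : List (Int × Int × Int)) (m t : Int × Int × Int) :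
    pvAMaxScan (mo ++ [t]) m = if t.2.2 > (pvAMaxScan mo m).2.2 then t else pvAMaxScan mo m := by
  simp [pvAMaxScan, List.foldl_append]

lemma pvAMaxScan_self (m : Int × Int × Int) (ms : List (Int × Int × Int)) :
    pvAMaxScan (m :: ms) m = pvAMaxScan ms m := by
  rw [pvAMaxScan_cons]; simp

lemma pvAMax_cons (m : Int × Int × Int) (ms : List (Int × Int × Int)) :
    pvAMax (m :: ms) = some ((pvAMaxScan ms m).1, (pvAMaxScan ms m).2.2) := by
  simp [pvAMax, pvAMaxScan_self]

-- appending the next marked triple updates the rescanned max exactly like B's running max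
lemma pvAMax_append (mo : List (Int × Int × Int)) (t : Int × Int × Int) :
    pvAMax (mo ++ [t]) = some (match pvAMax mo with
      | none => (t.1, t.2.2)
      | some b => if t.2.2 > b.2 then (t.1, t.2.2) else b) := by
  cases mo with
  | nil => simp [pvAMax, pvAMaxScan]
  | cons m ms =>
    rw [List.cons_append, pvAMax_cons, pvAMax_cons, pvAMaxScan_append]
    by_cases h : t.2.2 > (pvAMaxScan ms m).2.2 <;> simp [h]

-- A's second-loop body, with the (constant) last-counter option made a parameter
def pvAStep (L : Option Int) (st : List (Int × Int × Int) × List Int) (i : Int × Int × Int) :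
    List (Int × Int × Int) × List Int :=
  if i.2.1 == 1 then
    let mo := st.1 ++ [i]
    if some i.1 == L then
      match mo with
      | [] => (mo, st.2)
      | m :: _ => ([], st.2 ++ [(pvAMaxScan mo m).1])
    else (mo, st.2)
  else
    match st.1 with
    | [] => (st.1, st.2)
    | m :: _ => ([], st.2 ++ [(pvAMaxScan st.1 m).1])

-- step-reduction lemmas for the two loop bodies
lemma pvAStep_mark_miss (L : Option Int) (mo : List (Int × Int × Int)) (peaks : List Int)
    (c v : Int) (h : (some c == L) = false) :
    pvAStep L (mo, peaks) (c, 1, v) = (mo ++ [(c, 1, v)], peaks) := by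
  simp [pvAStep, h]

lemma pvAStep_mark_hit (L : Option Int) (mo : List (Int × Int × Int)) (peaks : List Int)
    (c v : Int) (h : (some c == L) = true) :
    pvAStep L (mo, peaks) (c, 1, v) =
      ([], peaks ++ [match pvAMax mo with | none => c | some b => if v > b.2 then c else b.1]) := by
  have happ := pvAMax_append mo (c, 1, v)
  cases hh : mo ++ [(c, 1, v)] with
  | nil => exact absurd hh (by simp)
  | cons m ms =>
    rw [hh, pvAMax_cons] at happ
    have h1 := congrArg (fun o => (Option.getD o (0, 0)).1) happ
    simp only [Option.getD_some] at h1
    simp only [pvAStep, h, hh]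
    simp only [pvAMaxScan_self, h1]
    cases pvAMax mo with
    | none => simp
    | some b => by_cases hb : v > b.2 <;> simp [hb]

lemma pvAStep_zero_nil (L : Option Int) (peaks : List Int) (c v : Int) :
    pvAStep L ([], peaks) (c, 0, v) = ([], peaks) := by
  simp [pvAStep]

lemma pvAStep_zero_cons (L : Option Int) (m : Int × Int × Int) (ms : List (Int × Int × Int))
    (peaks : List Int) (c v : Int) :
    pvAStep L (m :: ms, peaks) (c, 0, v) = ([], peaks ++ [(pvAMaxScan ms m).1]) := by
  simp [pvAStep, pvAMaxScan_self]

lemma pvBStep_up_none (up : Int) (peaks : List Int) (idx v : Int) (h : v > up) :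
    pvBStep up (peaks, idx, none) v = (peaks, idx + 1, some (idx, v)) := by
  simp [pvBStep, h]

lemma pvBStep_up_some (up : Int) (peaks : List Int) (idx bi bv v : Int) (h : v > up) :
    pvBStep up (peaks, idx, some (bi, bv)) v =
      (peaks, idx + 1, if v > bv then some (idx, v) else some (bi, bv)) := by
  simp [pvBStep, h]

lemma pvBStep_dn_none (up : Int) (peaks : List Int) (idx v : Int) (h : ¬ v > up) :
    pvBStep up (peaks, idx, none) v = (peaks, idx + 1, none) := by
  simp [pvBStep, h]

lemma pvBStep_dn_some (up : Int) (peaks : List Int) (idx v : Int) (b : Int × Int) (h : ¬ v > up) :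
    pvBStep up (peaks, idx, some b) v = (peaks ++ [b.1], idx + 1, none) := by
  simp [pvBStep, h]

-- main invariant: A's fold over the remaining triples equals B's fold over the remaining
-- values followed by the final flush, whenever the carried run-states correspond
lemma pvMain (up L : Int) (xs : List Int) (hxs : xs ≠ []) :
    ∀ (c : Int) (mo : List (Int × Int × Int)) (best : Option (Int × Int)) (peaks : List Int),
    pvAMax mo = best → c + xs.length = L + 1 →
    ((pvMkTv up c xs).foldl (pvAStep (some L)) (mo, peaks)).2 =
      (match (xs.foldl (pvBStep up) (peaks, c, best)).2.2 with
        | none => (xs.foldl (pvBStep up) (peaks, c, best)).1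
        | some b => (xs.foldl (pvBStep up) (peaks, c, best)).1 ++ [b.1]) := by
  induction xs with
  | nil => exact absurd rfl hxs
  | cons v vs ih =>
    intro c mo best peaks hR hL
    subst hR
    by_cases hnil : vs = []
    · -- v is the last element: its counter c equals L, A flushes inside the loop
      subst hnil
      have hc : (some c == some L) = true := by
        simp only [List.length_cons, List.length_nil] at hL
        simp; omega
      simp only [pvMkTv, List.foldl_cons, List.foldl_nil]
      by_cases hv : v > up
      · rw [if_pos hv, pvAStep_mark_hit _ _ _ _ _ hc]
        cases hA : pvAMax mo with
        | none => rw [pvBStep_up_none _ _ _ _ hv]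
        | some b =>
          obtain ⟨bi, bv⟩ := b
          rw [pvBStep_up_some _ _ _ _ _ _ hv]
          by_cases hb : v > bv <;> simp [hb]
      · rw [if_neg hv]
        cases hA : pvAMax mo with
        | none =>
          cases hmo : mo with
          | nil => rw [pvAStep_zero_nil, pvBStep_dn_none _ _ _ _ hv]
          | cons m ms => rw [hmo, pvAMax_cons] at hA; exact absurd hA (by simp)
        | some b =>
          cases hmo : mo with
          | nil => rw [hmo] at hA; exact absurd hA (by simp [pvAMax])
          | cons m ms =>
            have hb1 : (pvAMaxScan ms m).1 = b.1 := by
              rw [hmo, pvAMax_cons] at hA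
              have := congrArg (fun o => (Option.getD o (0, 0)).1) hA
              simpa using this
            rw [pvAStep_zero_cons, pvBStep_dn_some _ _ _ _ _ hv, hb1]
    · -- v is not the last element: its counter c ≠ L; both sides step, the invariant is kept
      have hc : (some c == some L) = false := by
        have hp : (0:Int) < vs.length := by
          cases vs with
          | nil => exact absurd rfl hnil
          | cons _ _ => exact_mod_cast Nat.succ_pos _
        simp only [List.length_cons] at hL
        simp; push_cast at hL; omega
      have hL' : c + 1 + (vs.length : Int) = L + 1 := by
        simp only [List.length_cons] at hL; push_cast at hL ⊢; omega
      simp only [pvMkTv, List.foldl_cons]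
      by_cases hv : v > up
      · rw [if_pos hv, pvAStep_mark_miss _ _ _ _ _ hc]
        cases hA : pvAMax mo with
        | none =>
          rw [pvBStep_up_none _ _ _ _ hv]
          exact ih hnil (c+1) (mo ++ [(c,1,v)]) (some (c, v)) peaks
            (by rw [pvAMax_append, hA]) hL'
        | some b =>
          obtain ⟨bi, bv⟩ := b
          rw [pvBStep_up_some _ _ _ _ _ _ hv]
          by_cases hb : v > bv
          · rw [if_pos hb]
            exact ih hnil (c+1) (mo ++ [(c,1,v)]) (some (c, v)) peaks
              (by rw [pvAMax_append, hA]; simp [hb]) hL'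
          · rw [if_neg hb]
            exact ih hnil (c+1) (mo ++ [(c,1,v)]) (some (bi, bv)) peaks
              (by rw [pvAMax_append, hA]; simp [hb]) hL'
      · rw [if_neg hv]
        cases hA : pvAMax mo with
        | none =>
          cases hmo : mo with
          | nil =>
            rw [pvAStep_zero_nil, pvBStep_dn_none _ _ _ _ hv]
            exact ih hnil (c+1) [] none peaks (by simp [pvAMax]) hL'
          | cons m ms => rw [hmo, pvAMax_cons] at hA; exact absurd hA (by simp)
        | some b =>
          cases hmo : mo with
          | nil => rw [hmo] at hA; exact absurd hA (by simp [pvAMax])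
          | cons m ms =>
            have hb1 : (pvAMaxScan ms m).1 = b.1 := by
              rw [hmo, pvAMax_cons] at hA
              have := congrArg (fun o => (Option.getD o (0, 0)).1) hA
              simpa using this
            rw [pvAStep_zero_cons, pvBStep_dn_some _ _ _ _ _ hv, hb1]
            exact ih hnil (c+1) [] none (peaks ++ [b.1]) (by simp [pvAMax]) hL'

-- ===== VERDICT (by name: the statement is the Claim_ definition above) =====
theorem detectrzacken_spec : Claim_equal_detectrzacken := by
  intro register threshold_up threshold_down currentindex _
  show detectrzacken register threshold_up threshold_down currentindex =
    detectrzacken_alt register threshold_up threshold_down currentindex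
  cases register with
  | nil => simp [detectrzacken, detectrzacken_alt]
  | cons v vs =>
    rw [detectrzacken, detectrzacken_alt]
    simp only [pvBuild_eq, List.nil_append]
    rw [pvMkTv_last threshold_up (v :: vs) currentindex (by simp)]
    rw [List.foldl_ext
      (g := pvAStep (some (currentindex + ((v :: vs).length : Int) - 1)))
      (H := by intro a x _; rfl)]
    exact pvMain threshold_up (currentindex + ((v :: vs).length : Int) - 1) (v :: vs) (by simp)
      currentindex [] none [] (by simp [pvAMax]) (by push_cast; ring)
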